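-- pv_equiv track=rewrite | github.com/Billlisa/art-history-review | scripts/build_dataset.py | is_boilerplate_title
-- ===== SOURCE A (Python) =====
-- def is_boilerplate_title(candidate: str) -> bool:
--     low = candidate.lower()
--     boilerplate = [
--         "topics",
--         "week",
--         "required slides",
--         "stars of",
--         "lecture",
--         "just for",
--         "credit card",
--         "background",
--     ]
--     return any(b in low for b in boilerplate)
-- ===== SOURCE B (Python) =====
-- PHRASES = ("topics", "week", "required slides", "stars of",
--            "lecture", "just for", "credit card", "background")
--
--
-- def is_boilerplate_title(candidate: str) -> bool:
--     low = candidate.lower()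
--     return any(low.startswith(p, i) for i in range(len(low)) for p in PHRASES)
-- ===== Notes on version B (the rewrite author's own statement) =====
-- stated objective: alternative
-- what changed: Replaces eight independent substring searches (phrase-outer) with a single left-to-right scan over positions that checks each phrase as a prefix at the current index (position-outer).
import Mathlib
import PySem

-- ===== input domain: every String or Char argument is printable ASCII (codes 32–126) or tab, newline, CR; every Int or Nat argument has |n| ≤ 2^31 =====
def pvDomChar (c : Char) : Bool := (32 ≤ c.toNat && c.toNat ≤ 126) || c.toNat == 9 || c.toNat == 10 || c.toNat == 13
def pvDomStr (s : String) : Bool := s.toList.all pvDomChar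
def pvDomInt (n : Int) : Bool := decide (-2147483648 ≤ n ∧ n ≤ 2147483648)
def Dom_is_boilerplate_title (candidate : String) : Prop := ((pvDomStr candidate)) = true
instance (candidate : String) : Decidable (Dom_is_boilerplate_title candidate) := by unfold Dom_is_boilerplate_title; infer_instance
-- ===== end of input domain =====

-- ===== PORT A =====
-- phrase-outer: each phrase tested for substring occurrence in the lowered title
def pvPhrases : List String :=
  ["topics", "week", "required slides", "stars of",
   "lecture", "just for", "credit card", "background"]

def is_boilerplate_title (candidate : String) : Bool :=
  let low := PySem.Str.lower candidate
  pvPhrases.any (fun b => PySem.Str.isIn b low)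

-- ===== PORT B =====
-- position-outer: one scan over positions of the lowered title, prefix test per phrase
def is_boilerplate_title_alt (candidate : String) : Bool :=
  let low := (PySem.Str.lower candidate).toList
  (List.range low.length).any (fun i =>
    pvPhrases.any (fun p => PySem.Chars.startswith (low.drop i) p.toList))

-- ===== PRECONDITION & SPEC =====
def Spec_is_boilerplate_title (candidate : String) (out : Bool) : Prop := out = is_boilerplate_title_alt candidate
instance (candidate : String) (out : Bool) : Decidable (Spec_is_boilerplate_title candidate out) := by unfold Spec_is_boilerplate_title; infer_instance

-- ===== CLAIM (what is proved, stated in full; the proofs are below) =====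
def Claim_equal_is_boilerplate_title : Prop := ∀ (candidate : String), Dom_is_boilerplate_title candidate → Spec_is_boilerplate_title candidate (is_boilerplate_title candidate)

-- ===== LEMMAS AND PROOFS =====

-- a nonempty pattern occurs as a substring iff it is a prefix at some position < length
theorem pvIsIn_eq_range_any (p cs : List Char) (hp : p ≠ []) :
    PySem.Chars.isIn p cs
      = (List.range cs.length).any (fun i => PySem.Chars.startswith (cs.drop i) p) := by
  rw [Bool.eq_iff_iff]
  simp only [List.any_eq_true, List.mem_range, PySem.Chars.startswith_iff,
    ← PySem.Chars.exists_prefix_drop_iff_isIn]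
  constructor
  · rintro ⟨j, hj⟩
    by_cases h : j < cs.length
    · exact ⟨j, h, hj⟩
    · exfalso
      rw [List.drop_eq_nil_of_le (le_of_not_gt h)] at hj
      exact hp (List.prefix_nil.mp hj)
  · rintro ⟨i, _, hi⟩
    exact ⟨i, hi⟩

-- ===== VERDICT (by name: the statement is the Claim_ definition above) =====
theorem is_boilerplate_title_spec : Claim_equal_is_boilerplate_title := by
  intro candidate _
  unfold Spec_is_boilerplate_title is_boilerplate_title is_boilerplate_title_alt
  rw [Bool.eq_iff_iff]
  simp only [List.any_eq_true]
  constructor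
  · rintro ⟨b, hb, hin⟩
    rw [show PySem.Str.isIn b (PySem.Str.lower candidate)
          = PySem.Chars.isIn b.toList (PySem.Str.lower candidate).toList from rfl,
        pvIsIn_eq_range_any _ _ (by fin_cases hb <;> decide)] at hin
    simp only [List.any_eq_true] at hin
    obtain ⟨i, hi, hpre⟩ := hin
    exact ⟨i, hi, b, hb, hpre⟩
  · rintro ⟨i, hi, b, hb, hpre⟩
    refine ⟨b, hb, ?_⟩
    rw [show PySem.Str.isIn b (PySem.Str.lower candidate)
          = PySem.Chars.isIn b.toList (PySem.Str.lower candidate).toList from rfl,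
        pvIsIn_eq_range_any _ _ (by fin_cases hb <;> decide)]
    simp only [List.any_eq_true]
    exact ⟨i, hi, hpre⟩
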